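-- pv_equiv track=rewrite | github.com/kamivour/StegoZKP_LAB | ImageLevel/verifier_package/src/zk_stego/zk_proof_generator.py | hash_to_field_elements
-- ===== SOURCE A (Python) =====
-- from typing import Dict, Any, Optional, Tuple, List
--
-- def hash_to_field_elements(hash_hex: str, n_elements: int = 8) -> List[int]:
--     """Convert SHA256 hash to field elements (8 elements = 256 bits)"""
--     hash_bytes = bytes.fromhex(hash_hex)
--     elements = []
--     bytes_per_element = len(hash_bytes) // n_elements
--
--     for i in range(n_elements):
--         start = i * bytes_per_element
--         end = start + bytes_per_element
--         element_bytes = hash_bytes[start:end]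
--         element_int = int.from_bytes(element_bytes, 'big')
--         elements.append(element_int)
--
--     return elements
-- ===== SOURCE B (Python) =====
-- from typing import List
--
--
-- def hash_to_field_elements(hash_hex: str, n_elements: int = 8) -> List[int]:
--     """Convert SHA256 hash to field elements: one nibble-accumulating scan of the
--     hex string into a single big integer, then arithmetic shift/mask extraction."""
--     big = 0
--     ndigits = 0
--     for c in hash_hex:
--         if not c.isspace():
--             big = big * 16 + int(c, 16)
--             ndigits += 1
--     nbytes = ndigits // 2
--     bpe = nbytes // n_elements
--     out = []
--     for i in range(n_elements):
--         low = 8 * (nbytes - (i + 1) * bpe)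
--         out.append((big >> low) % (1 << (8 * bpe)))
--     return out
-- ===== Notes on version B (the rewrite author's own statement) =====
-- stated objective: alternative
-- what changed: B never materializes the byte list: a single nibble-accumulating scan folds the non-whitespace hex characters into one big integer (counting digits as it goes), and each field element is then extracted arithmetically by shifting and masking, instead of A's per-element byte slicing plus int.from_bytes reconversion.
import Mathlib
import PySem

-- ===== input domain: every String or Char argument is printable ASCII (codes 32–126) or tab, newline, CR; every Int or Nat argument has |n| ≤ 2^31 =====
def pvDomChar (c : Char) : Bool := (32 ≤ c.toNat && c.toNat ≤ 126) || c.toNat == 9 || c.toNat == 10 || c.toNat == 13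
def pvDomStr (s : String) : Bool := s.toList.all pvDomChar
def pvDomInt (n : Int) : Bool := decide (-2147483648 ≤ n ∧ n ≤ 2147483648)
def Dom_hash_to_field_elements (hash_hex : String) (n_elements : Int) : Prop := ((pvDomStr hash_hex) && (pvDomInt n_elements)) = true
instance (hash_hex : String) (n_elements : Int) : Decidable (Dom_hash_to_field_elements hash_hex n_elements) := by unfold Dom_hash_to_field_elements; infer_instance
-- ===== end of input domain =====

-- B never builds the byte list: one nibble-accumulating scan of the hex string into a single
-- big integer, then arithmetic shift/mask extraction of each element (alternative decomposition,
-- same cost class; no speed claim).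


-- ===== PORT A =====
-- bytes.fromhex, ported by hand (no PySem primitive): skips ASCII whitespace between byte
-- pairs, requires each pair to be two consecutive hex digits; exact on the ASCII domain
-- (none = ValueError).
def pvHexVal? (c : Char) : Option Int :=
  if '0' ≤ c ∧ c ≤ '9' then some ((c.toNat : Int) - 48)
  else if 'a' ≤ c ∧ c ≤ 'f' then some ((c.toNat : Int) - 87)
  else if 'A' ≤ c ∧ c ≤ 'F' then some ((c.toNat : Int) - 55)
  else none

def pvIsWS (c : Char) : Bool :=
  c = ' ' || c = '\t' || c = '\n' || c = '\r' || c = '\x0b' || c = '\x0c'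

def pvFromHex? : List Char → Option (List Int)
  | [] => some []
  | c :: rest =>
    if pvIsWS c then pvFromHex? rest
    else
      match pvHexVal? c with
      | none => none
      | some h =>
        match rest with
        | [] => none
        | d :: rest' =>
          match pvHexVal? d with
          | none => none
          | some l => (pvFromHex? rest').map (fun bs => (16 * h + l) :: bs)

-- int.from_bytes(bs, 'big'), ported by hand as the big-endian fold (exact).
def pvFromBytes (bs : List Int) : Int := bs.foldl (fun a b => a * 256 + b) 0

def hash_to_field_elements (hash_hex : String) (n_elements : Int) : List Int :=
  match pvFromHex? hash_hex.toList with
  | none => []  -- ValueError; excluded by Pre_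
  | some hash_bytes =>
    let bytes_per_element := PySem.Int.floordiv (hash_bytes.length : Int) n_elements
    (PySem.List.pyRange 0 n_elements 1).foldl (fun elements i =>
      let start := i * bytes_per_element
      let stop := start + bytes_per_element
      let element_bytes := PySem.List.slice hash_bytes (some start) (some stop)
      let element_int := pvFromBytes element_bytes
      elements ++ [element_int]) []

-- ===== PORT B =====
-- int(c, 16) on the single non-space character c, ported by hand as its hex-digit value;
-- Python raises ValueError on a non-hex character, which Pre_ excludes (getD 0 unreachable
-- inside Pre_).  Python's big >> low and 1 << k are Lean's >>> / <<< (low, k ≥ 0 whenever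
-- the loop body runs).
def hash_to_field_elements_alt (hash_hex : String) (n_elements : Int) : List Int :=
  let st := hash_hex.toList.foldl (fun (st : Int × Int) c =>
      if PySem.Chars.isspace c then st
      else (st.1 * 16 + (pvHexVal? c).getD 0, st.2 + 1)) (0, 0)
  let big := st.1
  let nbytes := PySem.Int.floordiv st.2 2
  let bpe := PySem.Int.floordiv nbytes n_elements
  (PySem.List.pyRange 0 n_elements 1).foldl (fun out i =>
      let low := 8 * (nbytes - (i + 1) * bpe)
      out ++ [PySem.Int.mod (big >>> low.toNat) ((1 : Int) <<< (8 * bpe).toNat)]) []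

-- ===== PRECONDITION & SPEC =====
-- the non-whitespace characters of the string, each with its position
def pvNonWS (cs : List Char) (i : Nat) : List (Char × Nat) :=
  (cs.zipIdx i).filter (fun x => !(pvIsWS x.1))

-- closed-form hex shape: every non-ws char is a hex digit, there is an even number of
-- them, and they come in adjacent pairs (positions 2j and 2j+1 are consecutive in cs)
def pvPairShape (nw : List (Char × Nat)) : Bool :=
  nw.all (fun x => (pvHexVal? x.1).isSome) &&
  nw.length % 2 == 0 &&
  (List.range (nw.length / 2)).all (fun j =>
    (nw.getD (2*j+1) (' ', 0)).2 == (nw.getD (2*j) (' ', 0)).2 + 1)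

-- A raises exactly on invalid hex strings (ValueError from bytes.fromhex: a non-ws
-- non-hex character, an odd number of hex digits, or a pair split by whitespace) and on
-- n_elements = 0 (ZeroDivisionError); such inputs are excluded (B may return elsewhere,
-- e.g. on pairs split by whitespace).
def Pre_hash_to_field_elements (hash_hex : String) (n_elements : Int) : Prop :=
  pvPairShape (pvNonWS hash_hex.toList 0) = true ∧ n_elements ≠ 0
instance (hash_hex : String) (n_elements : Int) : Decidable (Pre_hash_to_field_elements hash_hex n_elements) := by unfold Pre_hash_to_field_elements; infer_instance

def pvWitness_hash_to_field_elements : String × Int := ("1234", 2)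

def Spec_hash_to_field_elements (hash_hex : String) (n_elements : Int) (out : List Int) : Prop := out = hash_to_field_elements_alt hash_hex n_elements
instance (hash_hex : String) (n_elements : Int) (out : List Int) : Decidable (Spec_hash_to_field_elements hash_hex n_elements out) := by unfold Spec_hash_to_field_elements; infer_instance

-- ===== CLAIM (what is proved, stated in full; the proofs are below) =====
def Claim_equal_hash_to_field_elements : Prop := ∀ (hash_hex : String) (n_elements : Int), Dom_hash_to_field_elements hash_hex n_elements → Pre_hash_to_field_elements hash_hex n_elements → Spec_hash_to_field_elements hash_hex n_elements (hash_to_field_elements hash_hex n_elements)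

-- ===== LEMMAS AND PROOFS =====

theorem pvWitness_ok :
    Dom_hash_to_field_elements pvWitness_hash_to_field_elements.1 pvWitness_hash_to_field_elements.2 ∧
    Pre_hash_to_field_elements pvWitness_hash_to_field_elements.1 pvWitness_hash_to_field_elements.2 := by
  decide

-- arithmetic helpers for splitting big = q * base + r with 0 ≤ r < base
theorem pv_mod_split (a b c : Int) (h2 : 0 ≤ a) (h3 : a < b) : (c * b + a) % b = a := by
  rw [add_comm, Int.add_mul_emod_self_right]
  exact Int.emod_eq_of_lt h2 h3

theorem pv_div_split (a b c : Int) (h2 : 0 ≤ a) (h3 : a < b) : (c * b + a) / b = c := by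
  rw [add_comm, Int.add_mul_ediv_right _ _ (by omega : b ≠ 0), Int.ediv_eq_zero_of_lt h2 h3]
  omega

theorem pv_char_le {a b : Char} (h : a ≤ b) : a.toNat ≤ b.toNat := Fin.mk_le_mk.mp h

theorem pvHexVal?_bounds (c : Char) (v : Int) (h : pvHexVal? c = some v) : 0 ≤ v ∧ v < 16 := by
  unfold pvHexVal? at h
  split_ifs at h with h1 h2 h3 <;>
    simp only [Option.some.injEq] at h <;>
    [ (have l := pv_char_le h1.1; have r := pv_char_le h1.2);
      (have l := pv_char_le h2.1; have r := pv_char_le h2.2);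
      (have l := pv_char_le h3.1; have r := pv_char_le h3.2) ] <;>
    (first
      | (have l2 : 48 ≤ c.toNat := l; have r2 : c.toNat ≤ 57 := r; omega)
      | (have l2 : 97 ≤ c.toNat := l; have r2 : c.toNat ≤ 102 := r; omega)
      | (have l2 : 65 ≤ c.toNat := l; have r2 : c.toNat ≤ 70 := r; omega))

-- every byte produced by pvFromHex? lies in [0, 256)
theorem pvFromHex?_bounds : ∀ (cs : List Char) (bs : List Int), pvFromHex? cs = some bs →
    ∀ b ∈ bs, 0 ≤ b ∧ b < 256 := by
  intro cs
  induction cs using pvFromHex?.induct with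
  | case1 =>
    intro bs h b hb
    rw [pvFromHex?.eq_def] at h
    simp only [Option.some.injEq] at h
    subst h; simp at hb
  | case2 c rest hws ih =>
    intro bs h
    rw [pvFromHex?.eq_def] at h
    simp only [hws, if_true] at h
    exact ih bs h
  | case3 c rest hws hc =>
    intro bs h
    rw [pvFromHex?.eq_def] at h
    simp [hws, hc] at h
  | case4 c hws v hc =>
    intro bs h
    rw [pvFromHex?.eq_def] at h
    simp [hws, hc] at h
  | case5 c hws v hc d rest' hd =>
    intro bs h
    rw [pvFromHex?.eq_def] at h
    simp [hws, hc, hd] at h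
  | case6 c hws v hc d rest' w hd ih =>
    intro bs h b hb
    rw [pvFromHex?.eq_def] at h
    simp only [hws, hc, hd, Bool.false_eq_true, if_false, Option.map_eq_some_iff] at h
    obtain ⟨bs', hbs', rfl⟩ := h
    rcases List.mem_cons.mp hb with rfl | hmem
    · have hb1 := pvHexVal?_bounds c v hc
      have hb2 := pvHexVal?_bounds d w hd
      omega
    · exact ih bs' hbs' b hmem

-- pvPairShape / pvNonWS facts, and their equivalence with bytes.fromhex succeeding
theorem pvNonWS_nil (i : Nat) : pvNonWS [] i = [] := rfl

theorem pvNonWS_cons (c : Char) (cs : List Char) (i : Nat) :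
    pvNonWS (c :: cs) i
      = if pvIsWS c then pvNonWS cs (i+1) else (c, i) :: pvNonWS cs (i+1) := by
  by_cases h : pvIsWS c <;> simp [pvNonWS, List.zipIdx_cons, h]

theorem pvNonWS_lb (cs : List Char) (i : Nat) : ∀ x ∈ pvNonWS cs i, i ≤ x.2 := by
  intro x hx
  have hx' : x ∈ cs.zipIdx i := List.mem_of_mem_filter hx
  obtain ⟨c, j⟩ := x
  exact (List.mem_zipIdx hx').1

theorem pvWS_not_hex (d : Char) (h : pvIsWS d = true) : pvHexVal? d = none := by
  simp only [pvIsWS, Bool.or_eq_true, decide_eq_true_eq] at h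
  rcases h with ((((h | h) | h) | h) | h) | h <;> subst h <;> decide

theorem pvPairShape_bad_hex (x : Char × Nat) (t : List (Char × Nat))
    (h : pvHexVal? x.1 = none) : pvPairShape (x :: t) = false := by
  simp [pvPairShape, h]

theorem pv_all_shift (k : Nat) (f g : Nat → Bool) (h0 : f 0 = true) (hs : ∀ j, f (j+1) = g j) :
    (List.range (k+1)).all f = (List.range k).all g := by
  rw [List.range_succ_eq_map, List.all_cons, h0, Bool.true_and, List.all_map]
  exact List.all_congr rfl (fun j => by simp only [Function.comp_apply, Nat.succ_eq_add_one, hs j])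

theorem pvPairShape_cons_ne (c : Char) (i : Nat) (t : List (Char × Nat))
    (h : ∀ y ∈ t.head?, y.2 ≠ i + 1) : pvPairShape ((c, i) :: t) = false := by
  cases t with
  | nil => simp [pvPairShape]
  | cons y t' =>
    have hy : y.2 ≠ i + 1 := h y rfl
    have hfalse : (List.range (((c,i) :: y :: t').length / 2)).all (fun j =>
        (((c,i) :: y :: t').getD (2*j+1) (' ', 0)).2 == (((c,i) :: y :: t').getD (2*j) (' ', 0)).2 + 1) = false := by
      apply List.all_eq_false.mpr
      refine ⟨0, List.mem_range.mpr (by simp only [List.length_cons]; omega), ?_⟩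
      simp [hy]
    unfold pvPairShape
    rw [hfalse, Bool.and_false]

theorem pvPairShape_cons2 (c d : Char) (i : Nat) (t : List (Char × Nat)) :
    pvPairShape ((c, i) :: (d, i+1) :: t)
      = ((pvHexVal? c).isSome && ((pvHexVal? d).isSome && pvPairShape t)) := by
  have e2 : ((c,i) :: (d,i+1) :: t).length / 2 = t.length / 2 + 1 := by
    simp [List.length_cons]; omega
  have key : (List.range (((c,i) :: (d,i+1) :: t).length / 2)).all (fun j =>
        (((c,i) :: (d,i+1) :: t).getD (2*j+1) (' ', 0)).2 == (((c,i) :: (d,i+1) :: t).getD (2*j) (' ', 0)).2 + 1)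
      = (List.range (t.length / 2)).all (fun j =>
        (t.getD (2*j+1) (' ', 0)).2 == (t.getD (2*j) (' ', 0)).2 + 1) := by
    rw [e2]
    apply pv_all_shift
    · simp only [Nat.mul_zero, Nat.zero_add, List.getD_cons_succ, List.getD_cons_zero]
      simp
    · intro j
      simp only [show 2 * (j+1) = (2*j)+1+1 from by omega, List.getD_cons_succ]
  have elen : (((c,i) :: (d,i+1) :: t).length % 2 == 0) = (t.length % 2 == 0) := by
    simp only [List.length_cons]
    rw [show t.length + 1 + 1 = t.length + 2 from rfl, Nat.add_mod_right]
  simp only [pvPairShape, key, elen, List.all_cons]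
  cases (pvHexVal? c).isSome <;> cases (pvHexVal? d).isSome <;>
    simp [Bool.and_assoc, Bool.and_comm]

theorem pvShape_iff (cs : List Char) : ∀ i : Nat,
    pvPairShape (pvNonWS cs i) = (pvFromHex? cs).isSome := by
  induction cs using pvFromHex?.induct with
  | case1 => intro i; simp [pvNonWS_nil, pvPairShape, pvFromHex?]
  | case2 c rest hws ih =>
    intro i
    rw [pvFromHex?.eq_def]
    simp only [hws, if_true]
    rw [pvNonWS_cons, if_pos hws]
    exact ih (i+1)
  | case3 c rest hws hc =>
    intro i
    rw [pvFromHex?.eq_def]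
    simp only [hws, hc, Bool.false_eq_true, if_false]
    rw [pvNonWS_cons, if_neg (by simp [hws])]
    simp [pvPairShape_bad_hex (c, i) _ hc]
  | case4 c hws v hc =>
    intro i
    rw [pvFromHex?.eq_def]
    simp only [hws, hc, Bool.false_eq_true, if_false]
    rw [pvNonWS_cons, if_neg (by simp [hws]), pvNonWS_nil]
    simp [pvPairShape]
  | case5 c hws v hc d rest' hd =>
    intro i
    rw [pvFromHex?.eq_def]
    simp only [hws, hc, hd, Bool.false_eq_true, if_false]
    rw [pvNonWS_cons, if_neg (by simp [hws])]
    by_cases hdw : pvIsWS d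
    · rw [pvNonWS_cons, if_pos hdw]
      rw [pvPairShape_cons_ne c i _ ?_]
      · simp
      · intro y hy
        have hmem : y ∈ pvNonWS rest' (i+1+1) := by
          cases hh : (pvNonWS rest' (i+1+1)).head? with
          | none => rw [hh] at hy; cases hy
          | some z =>
            rw [hh] at hy
            simp at hy
            subst hy
            exact List.mem_of_mem_head? hh
        have := pvNonWS_lb rest' (i+1+1) y hmem
        omega
    · rw [pvNonWS_cons, if_neg (by simp [hdw])]
      rw [pvPairShape_cons2]
      simp [hd]
  | case6 c hws v hc d rest' w hd ih =>
    intro i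
    rw [pvFromHex?.eq_def]
    simp only [hws, hc, hd, Bool.false_eq_true, if_false]
    have hdw : pvIsWS d = false := by
      by_contra hcon
      simp only [Bool.not_eq_false] at hcon
      rw [pvWS_not_hex d hcon] at hd
      cases hd
    rw [pvNonWS_cons, if_neg (by simp [hws]), pvNonWS_cons, if_neg (by simp [hdw])]
    rw [pvPairShape_cons2]
    simp [hc, hd, ih (i+1+1)]

-- on the ASCII domain, Python's c.isspace() agrees with bytes.fromhex's whitespace set
theorem pv_isspace_eq (c : Char) (h : pvDomChar c = true) : PySem.Chars.isspace c = pvIsWS c := by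
  have e : ∀ d : Char, (c = d) ↔ (c.toNat = d.toNat) :=
    fun d => ⟨fun h => by rw [h], fun h => Char.ext (UInt32.toNat_inj.mp h)⟩
  simp only [pvDomChar, Bool.or_eq_true, Bool.and_eq_true, decide_eq_true_eq, beq_iff_eq] at h
  rw [Bool.eq_iff_iff]
  simp only [PySem.Chars.isspace, pvIsWS, Bool.or_eq_true, Bool.and_eq_true, decide_eq_true_eq, e,
    show ' '.toNat = 32 from rfl, show '\t'.toNat = 9 from rfl, show '\n'.toNat = 10 from rfl,
    show '\r'.toNat = 13 from rfl, show '\x0b'.toNat = 11 from rfl, show '\x0c'.toNat = 12 from rfl]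
  omega

-- foldl of the from_bytes step from an arbitrary accumulator
theorem pvFromBytes_foldl (xs : List Int) (a : Int) :
    xs.foldl (fun a b => a * 256 + b) a = a * 256 ^ xs.length + pvFromBytes xs := by
  induction xs generalizing a with
  | nil => simp [pvFromBytes]
  | cons x xs ih =>
    have hr : pvFromBytes (x :: xs) = x * 256 ^ xs.length + pvFromBytes xs := by
      simp only [pvFromBytes, List.foldl_cons, zero_mul, zero_add]
      exact ih x
    simp only [List.foldl_cons, List.length_cons]
    rw [ih (a * 256 + x), hr, pow_succ]
    ring

theorem pvFromBytes_append (xs ys : List Int) :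
    pvFromBytes (xs ++ ys) = pvFromBytes xs * 256 ^ ys.length + pvFromBytes ys := by
  simp only [pvFromBytes, List.foldl_append]
  rw [pvFromBytes_foldl]
  rfl

theorem pvFromBytes_bounds (xs : List Int) (h : ∀ b ∈ xs, 0 ≤ b ∧ b < 256) :
    0 ≤ pvFromBytes xs ∧ pvFromBytes xs < 256 ^ xs.length := by
  induction xs with
  | nil => simp [pvFromBytes]
  | cons x xs ih =>
    have hx := h x (by simp)
    have ih' := ih (fun b hb => h b (by simp [hb]))
    have hxx : pvFromBytes (x :: xs) = x * 256 ^ xs.length + pvFromBytes xs := by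
      simpa [pvFromBytes] using pvFromBytes_foldl xs x
    rw [hxx]
    have hpow : (0:Int) < 256 ^ xs.length := by positivity
    constructor
    · nlinarith [hx.1, ih'.1]
    · simp only [List.length_cons, pow_succ]
      nlinarith [hx.2, ih'.2]

-- B's scan: on a string bytes.fromhex accepts, the nibble fold computes the big-endian
-- byte value and counts the hex digits
theorem pv_scan (cs : List Char) : ∀ (bs : List Int), pvFromHex? cs = some bs →
    (∀ c ∈ cs, pvDomChar c = true) → ∀ (a k : Int),
    cs.foldl (fun (st : Int × Int) c =>
        if PySem.Chars.isspace c then st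
        else (st.1 * 16 + (pvHexVal? c).getD 0, st.2 + 1)) (a, k)
      = (a * 256 ^ bs.length + pvFromBytes bs, k + 2 * (bs.length : Int)) := by
  induction cs using pvFromHex?.induct with
  | case1 =>
    intro bs h _ a k
    rw [pvFromHex?.eq_def] at h
    simp only [Option.some.injEq] at h
    subst h
    simp [pvFromBytes]
  | case2 c rest hws ih =>
    intro bs h hdom a k
    rw [pvFromHex?.eq_def] at h
    simp only [hws, if_true] at h
    simp only [List.foldl_cons, pv_isspace_eq c (hdom c (by simp)), hws, if_true]
    exact ih bs h (fun x hx => hdom x (by simp [hx])) a k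
  | case3 c rest hws hc =>
    intro bs h
    rw [pvFromHex?.eq_def] at h
    simp [hws, hc] at h
  | case4 c hws v hc =>
    intro bs h
    rw [pvFromHex?.eq_def] at h
    simp [hws, hc] at h
  | case5 c hws v hc d rest' hd =>
    intro bs h
    rw [pvFromHex?.eq_def] at h
    simp [hws, hc, hd] at h
  | case6 c hws v hc d rest' w hd ih =>
    intro bs h hdom a k
    rw [pvFromHex?.eq_def] at h
    simp only [hws, hc, hd, Bool.false_eq_true, if_false, Option.map_eq_some_iff] at h
    obtain ⟨bs', hbs', rfl⟩ := h
    have hdw : pvIsWS d = false := by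
      by_contra hcon
      simp only [Bool.not_eq_false] at hcon
      rw [pvWS_not_hex d hcon] at hd
      cases hd
    simp only [List.foldl_cons,
      pv_isspace_eq c (hdom c (by simp)), pv_isspace_eq d (hdom d (by simp)),
      hws, hdw, Bool.false_eq_true, if_false, hc, hd, Option.getD_some]
    rw [ih bs' hbs' (fun x hx => hdom x (by simp [hx])) ((a * 16 + v) * 16 + w) (k + 1 + 1)]
    have hcons : pvFromBytes ((16 * v + w) :: bs')
        = (16 * v + w) * 256 ^ bs'.length + pvFromBytes bs' := by
      simpa [pvFromBytes] using pvFromBytes_foldl bs' (16 * v + w)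
    refine Prod.ext ?_ ?_
    · simp only [hcons, List.length_cons, pow_succ]
      ring
    · simp only [List.length_cons]
      push_cast
      ring

-- the k-th extracted element of the big integer is the k-th byte chunk's value
theorem pv_elem (xs : List Int) (hbnd : ∀ b ∈ xs, 0 ≤ b ∧ b < 256) (p k m : Nat)
    (hk : k < m) (hmp : m * p ≤ xs.length) :
    PySem.Int.mod (pvFromBytes xs >>> (8 * (xs.length - (k+1)*p))) ((1 : Int) <<< (8*p))
      = pvFromBytes ((xs.drop (k*p)).take p) := by
  have hk'le : (k+1)*p ≤ xs.length :=
    le_trans (Nat.mul_le_mul_right p (Nat.succ_le_of_lt hk)) hmp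
  set L := xs.length with hL
  set k' := (k+1)*p with hk'
  have hpow : ∀ t : Nat, ((2:Int) ^ (8*t)) = 256 ^ t := by
    intro t; rw [pow_mul]; norm_num
  have hsplit : xs = xs.take k' ++ xs.drop k' := (List.take_append_drop _ xs).symm
  have hlt : (xs.take k').length = k' := by rw [List.length_take]; omega
  have hld : (xs.drop k').length = L - k' := by rw [List.length_drop]
  have hdb : 0 ≤ pvFromBytes (xs.drop k') ∧ pvFromBytes (xs.drop k') < 256 ^ (L - k') := by
    have := pvFromBytes_bounds (xs.drop k') (fun b hb => hbnd b (List.mem_of_mem_drop hb))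
    rwa [hld] at this
  have hbig : pvFromBytes xs
      = pvFromBytes (xs.take k') * 256 ^ (L - k') + pvFromBytes (xs.drop k') := by
    conv_lhs => rw [hsplit]
    rw [pvFromBytes_append, hld]
  -- the right shift peels off the bytes below position k'
  have hshift : pvFromBytes xs >>> (8 * (L - k')) = pvFromBytes (xs.take k') := by
    rw [Int.shiftRight_eq_div_pow, hbig]
    push_cast
    rw [hpow (L - k')]
    exact pv_div_split _ _ _ hdb.1 hdb.2
  -- the prefix of length k' splits as the first k*p bytes plus the k-th chunk
  have hchunklen : ((xs.drop (k*p)).take p).length = p := by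
    rw [List.length_take, List.length_drop]
    have : k * p + p = k' := by rw [hk']; ring
    omega
  have htk : xs.take k' = xs.take (k*p) ++ (xs.drop (k*p)).take p := by
    rw [show k' = k*p + p from by rw [hk']; ring, List.take_add]
  have hcb : 0 ≤ pvFromBytes ((xs.drop (k*p)).take p) ∧
      pvFromBytes ((xs.drop (k*p)).take p) < 256 ^ p := by
    have := pvFromBytes_bounds ((xs.drop (k*p)).take p)
      (fun b hb => hbnd b (List.mem_of_mem_drop (List.mem_of_mem_take hb)))
    rwa [hchunklen] at this
  have htkv : pvFromBytes (xs.take k')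
      = pvFromBytes (xs.take (k*p)) * 256 ^ p + pvFromBytes ((xs.drop (k*p)).take p) := by
    rw [htk, pvFromBytes_append, hchunklen]
  have hbase : ((1 : Int) <<< (8*p)) = 256 ^ p := by
    rw [Int.shiftLeft_eq, one_mul]
    exact hpow p
  rw [hshift, hbase, PySem.Int.mod_eq_emod_of_pos (by positivity), htkv]
  exact pv_mod_split _ _ _ hcb.1 hcb.2

-- ===== VERDICT (by name: the statement is the Claim_ definition above) =====
theorem hash_to_field_elements_spec : Claim_equal_hash_to_field_elements := by
  intro s n hdom hpre
  obtain ⟨hshape, hnz⟩ := hpre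
  have hdomc : ∀ c ∈ s.toList, pvDomChar c = true := by
    unfold Dom_hash_to_field_elements pvDomStr at hdom
    simp only [Bool.and_eq_true, List.all_eq_true] at hdom
    exact hdom.1
  have hsome : (pvFromHex? s.toList).isSome = true := by
    rw [← pvShape_iff s.toList 0]
    exact hshape
  unfold Spec_hash_to_field_elements hash_to_field_elements hash_to_field_elements_alt
  cases hfh : pvFromHex? s.toList with
  | none => exact absurd hsome (by rw [hfh]; simp)
  | some hb =>
    simp only
    rw [pv_scan s.toList hb hfh hdomc 0 0]
    simp only [zero_mul, zero_add]
    have hbounds := pvFromHex?_bounds s.toList hb hfh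
    set L := hb.length with hLdef
    have hnbytes : PySem.Int.floordiv (2 * (L : Int)) 2 = (L : Int) := by
      rw [PySem.Int.floordiv_eq_ediv_of_pos (by norm_num)]
      exact Int.mul_ediv_cancel_left _ (by norm_num)
    rw [hnbytes]
    rcases lt_trichotomy n 0 with hneg | h0 | hpos
    · simp [PySem.List.pyRange_one_eq_nil (le_of_lt hneg)]
    · exact absurd h0 hnz
    · -- n > 0
      have hbpe0 : 0 ≤ PySem.Int.floordiv (L : Int) n := by
        rw [PySem.Int.floordiv_eq_ediv_of_pos hpos]
        exact Int.ediv_nonneg (by positivity) (le_of_lt hpos)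
      set bpe := PySem.Int.floordiv (L : Int) n with hbpe
      set p := bpe.toNat with hp
      have hpc : bpe = (p : Int) := (Int.toNat_of_nonneg hbpe0).symm
      set m := n.toNat with hm
      have hnc : n = (m : Int) := (Int.toNat_of_nonneg (le_of_lt hpos)).symm
      -- m * p ≤ L
      have hmp : m * p ≤ L := by
        have h1 := PySem.Int.floordiv_mul_add_mod (L : Int) n
        have h2 := PySem.Int.mod_nonneg (L : Int) hpos
        rw [← hbpe] at h1
        have h3 : bpe * n ≤ (L : Int) := by omega
        rw [hpc, hnc] at h3
        have h4 : ((p * m : Nat) : Int) ≤ (L : Int) := by push_cast; linarith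
        rw [Nat.mul_comm]
        exact Nat.cast_le.mp h4
      -- both loops append one element per index: they are maps over the same range
      rw [PySem.List.foldl_append_singleton_eq_map
        (fun i => pvFromBytes (PySem.List.slice hb (some (i * bpe)) (some (i * bpe + bpe))))
        (PySem.List.pyRange 0 n) []]
      rw [PySem.List.foldl_append_singleton_eq_map
        (fun i => PySem.Int.mod (pvFromBytes hb >>> ((8 * ((L : Int) - (i + 1) * bpe)).toNat))
          ((1 : Int) <<< ((8 * bpe).toNat)))
        (PySem.List.pyRange 0 n) []]
      simp only [List.nil_append]
      apply List.map_congr_left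
      intro i hi
      rw [PySem.List.pyRange_one 0 n] at hi
      simp only [List.mem_map, List.mem_range] at hi
      obtain ⟨k, hkm, rfl⟩ := hi
      have hkm' : k < m := by omega
      simp only [zero_add]
      -- A's slice is the k-th chunk
      have hcast : (k : Int) * bpe = ((k * p : Nat) : Int) := by rw [hpc]; push_cast; ring
      have hcast2 : (k : Int) * bpe + bpe = ((k * p : Nat) : Int) + ((p : Nat) : Int) := by
        rw [hcast, hpc]
      rw [hcast2, hcast, PySem.List.slice_natCast_add hb (k * p) p]
      -- B's shift amounts, as naturals
      have hk'le : (k+1)*p ≤ L :=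
        le_trans (Nat.mul_le_mul_right p (Nat.succ_le_of_lt hkm')) hmp
      have hcast3 : ((k : Int) + 1) * bpe = (((k+1) * p : Nat) : Int) := by
        rw [hpc]; push_cast; ring
      have hlow : ((8 : Int) * ((L : Int) - ((k : Int) + 1) * bpe)).toNat
          = 8 * (L - (k+1)*p) := by
        rw [hcast3]
        omega
      have hmask : ((8 : Int) * bpe).toNat = 8 * p := by
        rw [hpc]; omega
      rw [hlow, hmask]
      exact (pv_elem hb hbounds p k m hkm' hmp).symm
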